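-- pv_equiv track=rewrite | github.com/paigemoody/weapons_classification_resources.github.io | src/csv_to_hypothesis_filtering.py | compute_leaf_sets
-- ===== SOURCE A (Python) =====
-- from typing import Dict, List, Set, Tuple
--
-- def compute_leaf_sets(
--     roots: List[str],
--     children: Dict[str, List[str]],
--     leaves: Set[str],
-- ) -> Dict[str, Set[str]]:
--     memo: Dict[str, Set[str]] = {}
--
--     def leaf_set(nid: str) -> Set[str]:
--         if nid in memo:
--             return memo[nid]
--         if nid in leaves:
--             memo[nid] = {nid}
--             return memo[nid]
--         result: Set[str] = set()
--         for child in children.get(nid, []):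
--             result |= leaf_set(child)
--         memo[nid] = result
--         return result
--
--     for r in roots:
--         leaf_set(r)
--     return memo
-- ===== SOURCE B (Python) =====
-- def compute_leaf_sets(roots, children, leaves):
--     # Phase 1: explicit-stack post-order traversal collecting the node visit order.
--     order = []
--     seen = set()
--     stack = [(r, False) for r in reversed(roots)]
--     while stack:
--         nid, done = stack.pop()
--         if done:
--             seen.add(nid)
--             order.append(nid)
--             continue
--         if nid in seen:
--             continue
--         if nid in leaves:
--             seen.add(nid)
--             order.append(nid)
--             continue
--         stack.append((nid, True))
--         for c in reversed(children.get(nid, [])):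
--             stack.append((c, False))
--     # Phase 2: one DP pass over the post-order (children precede parents).
--     memo = {}
--     for nid in order:
--         if nid in leaves:
--             memo[nid] = {nid}
--         else:
--             s = set()
--             for c in children.get(nid, []):
--                 s |= memo.get(c, set())
--             memo[nid] = s
--     return memo
-- ===== Notes on version B (the rewrite author's own statement) =====
-- stated objective: alternative
-- what changed: The recursive memoized helper is replaced by a two-phase iterative algorithm: an explicit-stack post-order traversal that only records the node visit order, followed by a single dynamic-programming pass over that order that builds every leaf set from its children's already-computed sets.
import Mathlib
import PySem

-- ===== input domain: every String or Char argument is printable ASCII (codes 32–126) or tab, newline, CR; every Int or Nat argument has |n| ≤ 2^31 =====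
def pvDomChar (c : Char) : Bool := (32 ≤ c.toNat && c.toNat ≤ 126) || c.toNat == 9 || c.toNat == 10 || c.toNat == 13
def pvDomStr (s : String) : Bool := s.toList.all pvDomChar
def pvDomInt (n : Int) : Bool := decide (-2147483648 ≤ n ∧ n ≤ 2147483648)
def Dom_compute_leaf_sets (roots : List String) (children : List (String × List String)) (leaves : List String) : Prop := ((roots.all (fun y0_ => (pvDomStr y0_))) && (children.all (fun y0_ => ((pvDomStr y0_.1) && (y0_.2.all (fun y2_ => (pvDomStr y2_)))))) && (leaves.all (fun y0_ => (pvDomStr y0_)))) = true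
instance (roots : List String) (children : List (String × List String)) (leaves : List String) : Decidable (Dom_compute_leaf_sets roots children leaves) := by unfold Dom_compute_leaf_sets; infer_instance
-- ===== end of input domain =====

-- B replaces A's recursive memoized DFS by an explicit-stack post-order traversal followed by one
-- DP pass over that order (objective: alternative, same asymptotic cost).

-- shared helper: children.get(nid, []) (the dict parameter, first-match lookup)
def pvChildren (children : List (String × List String)) (nid : String) : List String :=
  (PySem.Dict.mk children).getD nid []

abbrev pvMemo := PySem.Dict String (PySem.Set String)

-- fuel bounds (any value large enough for the terminating runs admitted by Pre_)
def pvW (children : List (String × List String)) : List String := children.flatMap (·.2)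
def pvN (roots : List String) (children : List (String × List String)) : Nat :=
  roots.length + (pvW children).length + 1
def pvFuelA (roots : List String) (children : List (String × List String)) : Nat :=
  pvN roots children + 1
def pvFuelB (roots : List String) (children : List (String × List String)) : Nat :=
  roots.length * (2 * ((pvW children).length + 1) ^ pvFuelA roots children)

-- ===== PORT A =====
-- the for-loop 'for child in children.get(nid, []): result |= leaf_set(child)' of leaf_set
def pvFoldA (g : pvMemo → String → Option (pvMemo × PySem.Set String)) :
    pvMemo → List String → PySem.Set String → Option (pvMemo × PySem.Set String)
  | memo, [], acc => some (memo, acc)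
  | memo, c :: cs, acc =>
    match g memo c with
    | none => none
    | some (m, s) => pvFoldA g m cs (PySem.Set.union acc s)

-- the nested helper leaf_set (fuel-totalized: none = the recursion does not terminate, RecursionError)
def pvLeafSetA (children : List (String × List String)) (leaves : List String) :
    Nat → pvMemo → String → Option (pvMemo × PySem.Set String)
  | 0, _, _ => none
  | Nat.succ f, memo, nid =>
    match memo.get? nid with
    | some s => some (memo, s)
    | none =>
      if leaves.contains nid then
        some (memo.insert nid (PySem.Set.ofList [nid]), PySem.Set.ofList [nid])
      else
        match pvFoldA (pvLeafSetA children leaves f) memo (pvChildren children nid) PySem.Set.empty with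
        | none => none
        | some (m, r) => some (m.insert nid r, r)

-- 'for r in roots: leaf_set(r)'
def pvRootsA (children : List (String × List String)) (leaves : List String) (fuel : Nat) :
    pvMemo → List String → Option pvMemo
  | memo, [] => some memo
  | memo, r :: rs =>
    match pvLeafSetA children leaves fuel memo r with
    | none => none
    | some (m, _) => pvRootsA children leaves fuel m rs

def compute_leaf_sets (roots : List String) (children : List (String × List String)) (leaves : List String) : List (String × List String) :=
  match pvRootsA children leaves (pvFuelA roots children) PySem.Dict.empty roots with
  | some memo => memo.items
  | none => []

-- ===== PORT B =====
-- phase-2 value of one node: {nid} for a leaf, else the union of the children's stored sets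
def pvVal (children : List (String × List String)) (leaves : List String) (m : pvMemo) (nid : String) : PySem.Set String :=
  if leaves.contains nid then PySem.Set.ofList [nid]
  else (pvChildren children nid).foldl (fun acc c => PySem.Set.union acc (m.getD c PySem.Set.empty)) PySem.Set.empty

-- phase 2: 'for nid in order: memo[nid] = …'
def pvBuild (children : List (String × List String)) (leaves : List String) (ord : List String) : pvMemo :=
  ord.foldl (fun m nid => m.insert nid (pvVal children leaves m nid)) PySem.Dict.empty

-- phase 1: the while-loop over the explicit stack (head of the list = top of the Python stack;
-- 'seen' is the Python set, 'ord' the order list; fuel-totalized: none = the loop does not terminate)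
def pvPostLoop (children : List (String × List String)) (leaves : List String) :
    Nat → PySem.Set String → List String → List (String × Bool) → Option (List String)
  | _, _, ord, [] => some ord
  | 0, _, _, _ :: _ => none
  | Nat.succ f, seen, ord, (nid, done) :: st =>
    if done then pvPostLoop children leaves f (PySem.Set.add seen nid) (ord ++ [nid]) st
    else if seen.contains nid then pvPostLoop children leaves f seen ord st
    else if leaves.contains nid then pvPostLoop children leaves f (PySem.Set.add seen nid) (ord ++ [nid]) st
    else pvPostLoop children leaves f seen ord
      ((pvChildren children nid).map (fun c => (c, false)) ++ (nid, true) :: st)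

def compute_leaf_sets_alt (roots : List String) (children : List (String × List String)) (leaves : List String) : List (String × List String) :=
  match pvPostLoop children leaves (pvFuelB roots children) PySem.Set.empty [] (roots.map (fun r => (r, false))) with
  | none => []
  | some ord => (pvBuild children leaves ord).items

-- ===== PRECONDITION & SPEC =====
-- the successor relation A's recursion expands: a leaf stops the recursion, anything else recurses into its children
def pvSucc (children : List (String × List String)) (leaves : List String) (nid : String) : List String :=
  if leaves.contains nid then [] else pvChildren children nid
def pvStep (children : List (String × List String)) (leaves : List String) (S : Finset String) : Finset String :=
  S ∪ S.biUnion (fun x => (pvSucc children leaves x).toFinset)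
def pvIter (children : List (String × List String)) (leaves : List String) : Nat → Finset String → Finset String
  | 0, S => S
  | Nat.succ k, S => pvStep children leaves (pvIter children leaves k S)
def pvReach (roots : List String) (children : List (String × List String)) (leaves : List String) : Finset String :=
  pvIter children leaves (pvN roots children) roots.toFinset

-- Pre_ excludes exactly the inputs on which A never returns (infinite recursion, a Python RecursionError):
-- those whose child graph has a cycle reachable from a root; on them B's while-loop does not terminate either.
def Pre_compute_leaf_sets (roots : List String) (children : List (String × List String)) (leaves : List String) : Prop :=
  ∀ nid ∈ pvReach roots children leaves,
    nid ∉ pvIter children leaves (pvN roots children) (pvSucc children leaves nid).toFinset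
instance (roots : List String) (children : List (String × List String)) (leaves : List String) : Decidable (Pre_compute_leaf_sets roots children leaves) := by unfold Pre_compute_leaf_sets; infer_instance

def pvWitness_compute_leaf_sets : List String × (List (String × List String)) × List String :=
  (["a"], [("a", ["b", "c"]), ("b", ["c"])], ["c"])

def Spec_compute_leaf_sets (roots : List String) (children : List (String × List String)) (leaves : List String) (out : List (String × List String)) : Prop := out = compute_leaf_sets_alt roots children leaves
instance (roots : List String) (children : List (String × List String)) (leaves : List String) (out : List (String × List String)) : Decidable (Spec_compute_leaf_sets roots children leaves out) := by unfold Spec_compute_leaf_sets; infer_instance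

-- ===== CLAIM (what is proved, stated in full; the proofs are below) =====
def Claim_equal_compute_leaf_sets : Prop := ∀ (roots : List String) (children : List (String × List String)) (leaves : List String), Dom_compute_leaf_sets roots children leaves → Pre_compute_leaf_sets roots children leaves → Spec_compute_leaf_sets roots children leaves (compute_leaf_sets roots children leaves)

-- ===== LEMMAS AND PROOFS =====

lemma pv_sub_step (children : List (String × List String)) (leaves : List String) (S : Finset String) :
    S ⊆ pvStep children leaves S := Finset.subset_union_left

lemma pv_step_mono (children : List (String × List String)) (leaves : List String) {S T : Finset String}
    (h : S ⊆ T) : pvStep children leaves S ⊆ pvStep children leaves T :=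
  Finset.union_subset_union h (Finset.biUnion_subset_biUnion_of_subset_left _ h)

lemma pv_sub_iter (children : List (String × List String)) (leaves : List String) (k : Nat) (S : Finset String) :
    S ⊆ pvIter children leaves k S := by
  induction k with
  | zero => exact fun x hx => hx
  | succ k ih => exact fun x hx => pv_sub_step children leaves _ (ih hx)

lemma pv_iter_mono (children : List (String × List String)) (leaves : List String) (k : Nat) {S T : Finset String}
    (h : S ⊆ T) : pvIter children leaves k S ⊆ pvIter children leaves k T := by
  induction k with
  | zero => exact h
  | succ k ih => exact pv_step_mono children leaves ih

lemma pv_iter_le_mono (children : List (String × List String)) (leaves : List String) {k m : Nat}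
    (h : k ≤ m) (S : Finset String) : pvIter children leaves k S ⊆ pvIter children leaves m S := by
  obtain ⟨d, rfl⟩ := Nat.exists_eq_add_of_le h
  induction d with
  | zero => exact fun x hx => hx
  | succ d ih =>
    have : k + (d + 1) = (k + d) + 1 := by omega
    rw [this]
    exact fun x hx => pv_sub_step children leaves _ (ih (by omega) hx)

lemma pv_children_cases (children : List (String × List String)) (nid : String) :
    pvChildren children nid = [] ∨ ∃ p ∈ children, p.1 = nid ∧ pvChildren children nid = p.2 := by
  induction children with
  | nil => left; rfl
  | cons p rest ih =>
    obtain ⟨k, v⟩ := p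
    by_cases h : k = nid
    · right
      refine ⟨(k, v), List.mem_cons_self, h, ?_⟩
      simp [pvChildren, PySem.Dict.getD_eq_get?_getD, PySem.Dict.get?_mk_cons, h]
    · have : pvChildren ((k, v) :: rest) nid = pvChildren rest nid := by
        simp [pvChildren, PySem.Dict.getD_eq_get?_getD, PySem.Dict.get?_mk_cons, h]
      rw [this]
      rcases ih with h1 | ⟨q, hq, hq1, hq2⟩
      · left; exact h1
      · right; exact ⟨q, List.mem_cons_of_mem _ hq, hq1, hq2⟩
lemma pv_children_mem_W (children : List (String × List String)) {nid x : String}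
    (h : x ∈ pvChildren children nid) : x ∈ pvW children := by
  rcases pv_children_cases children nid with h0 | ⟨p, hp, _, hp2⟩
  · rw [h0] at h; cases h
  · rw [hp2] at h
    exact List.mem_flatMap.mpr ⟨p, hp, h⟩

lemma pv_children_len (children : List (String × List String)) (nid : String) :
    (pvChildren children nid).length ≤ (pvW children).length := by
  rcases pv_children_cases children nid with h0 | ⟨p, hp, _, hp2⟩
  · rw [h0]; exact Nat.zero_le _
  · rw [hp2, pvW, List.length_flatMap]
    exact List.le_sum_of_mem (List.mem_map_of_mem hp)

lemma pv_succ_sub_W (children : List (String × List String)) (leaves : List String) {nid x : String}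
    (h : x ∈ pvSucc children leaves nid) : x ∈ pvW children := by
  unfold pvSucc at h
  split at h
  · cases h
  · exact pv_children_mem_W children h

lemma pv_iter_sub_union (children : List (String × List String)) (leaves : List String) (k : Nat) (S : Finset String) :
    pvIter children leaves k S ⊆ S ∪ (pvW children).toFinset := by
  induction k with
  | zero => exact Finset.subset_union_left
  | succ k ih =>
    intro x hx
    rcases Finset.mem_union.mp hx with h | h
    · exact ih h
    · rcases Finset.mem_biUnion.mp h with ⟨y, _, hy⟩
      exact Finset.mem_union_right _ (List.mem_toFinset.mpr (pv_succ_sub_W children leaves (List.mem_toFinset.mp hy)))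

lemma pv_fixaux (children : List (String × List String)) (leaves : List String) (m : Nat) (S : Finset String) :
    pvIter children leaves (m + 1) S = pvIter children leaves m S ∨ m < (pvIter children leaves m S).card := by
  induction m with
  | zero =>
    by_cases h : pvIter children leaves 1 S = pvIter children leaves 0 S
    · exact Or.inl h
    · right
      rcases Finset.eq_empty_or_nonempty S with rfl | hne
      · exfalso; apply h; simp [pvIter, pvStep]
      · exact Finset.card_pos.mpr hne
  | succ m ih =>
    rcases ih with h | h
    · left
      show pvStep children leaves (pvIter children leaves (m+1) S) = pvIter children leaves (m+1) S
      rw [h]; exact h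
    · by_cases he : pvIter children leaves (m + 1) S = pvIter children leaves m S
      · left
        show pvStep children leaves (pvIter children leaves (m+1) S) = pvIter children leaves (m+1) S
        rw [he]; exact he
      · right
        have hsub : pvIter children leaves m S ⊂ pvIter children leaves (m+1) S :=
          ⟨pv_sub_step children leaves _, fun hc => he (Finset.Subset.antisymm hc (pv_sub_step children leaves _))⟩
        have := Finset.card_lt_card hsub
        omega

lemma pv_step_iter_eq (children : List (String × List String)) (leaves : List String) {m : Nat} {S : Finset String}
    (h : (S ∪ (pvW children).toFinset).card ≤ m) :
    pvStep children leaves (pvIter children leaves m S) = pvIter children leaves m S := by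
  rcases pv_fixaux children leaves m S with h1 | h1
  · exact h1
  · exfalso
    have := Finset.card_le_card (pv_iter_sub_union children leaves m S)
    omega

lemma pv_iter_sub_closed (children : List (String × List String)) (leaves : List String) {T : Finset String}
    (hcl : pvStep children leaves T = T) {S : Finset String} (h : S ⊆ T) (k : Nat) :
    pvIter children leaves k S ⊆ T := by
  induction k with
  | zero => exact h
  | succ k ih =>
    show pvStep children leaves (pvIter children leaves k S) ⊆ T
    calc pvStep children leaves (pvIter children leaves k S) ⊆ pvStep children leaves T := pv_step_mono children leaves ih
      _ = T := hcl

lemma pv_reach_closed (roots : List String) (children : List (String × List String)) (leaves : List String) :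
    pvStep children leaves (pvReach roots children leaves) = pvReach roots children leaves := by
  apply pv_step_iter_eq
  calc (roots.toFinset ∪ (pvW children).toFinset).card
      ≤ roots.toFinset.card + (pvW children).toFinset.card := Finset.card_union_le _ _
    _ ≤ roots.length + (pvW children).length := Nat.add_le_add roots.toFinset_card_le (pvW children).toFinset_card_le
    _ ≤ pvN roots children := by unfold pvN; omega

lemma pv_singleton_closed (roots : List String) (children : List (String × List String)) (leaves : List String) (x : String) :
    pvStep children leaves (pvIter children leaves (pvN roots children) {x})
      = pvIter children leaves (pvN roots children) {x} := by
  apply pv_step_iter_eq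
  calc ({x} ∪ (pvW children).toFinset).card
      ≤ ({x} : Finset String).card + (pvW children).toFinset.card := Finset.card_union_le _ _
    _ ≤ 1 + (pvW children).length := Nat.add_le_add (by simp) (pvW children).toFinset_card_le
    _ ≤ pvN roots children := by unfold pvN; omega

lemma pv_child_in_reach (roots : List String) (children : List (String × List String)) (leaves : List String)
    {nid c : String} (hn : nid ∈ pvReach roots children leaves) (hl : leaves.contains nid = false)
    (hc : c ∈ pvChildren children nid) : c ∈ pvReach roots children leaves := by
  rw [← pv_reach_closed roots children leaves]
  apply Finset.mem_union_right
  apply Finset.mem_biUnion.mpr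
  have hl' : nid ∉ leaves := by simpa using hl
  exact ⟨nid, hn, List.mem_toFinset.mpr (by simp [pvSucc, hl', hc])⟩

lemma pv_iter_child_sub (roots : List String) (children : List (String × List String)) (leaves : List String)
    {nid c : String} (hl : leaves.contains nid = false) (hc : c ∈ pvChildren children nid) :
    pvIter children leaves (pvN roots children) {c} ⊆ pvIter children leaves (pvN roots children) {nid} := by
  apply pv_iter_sub_closed children leaves (pv_singleton_closed roots children leaves nid)
  intro y hy
  rw [Finset.mem_singleton] at hy
  subst hy
  have h1 : y ∈ pvStep children leaves ({nid} : Finset String) := by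
    apply Finset.mem_union_right
    have hl' : nid ∉ leaves := by simpa using hl
    exact Finset.mem_biUnion.mpr ⟨nid, Finset.mem_singleton_self nid, List.mem_toFinset.mpr (by simp [pvSucc, hl', hc])⟩
  have h2 : pvStep children leaves ({nid} : Finset String) ⊆ pvIter children leaves (pvN roots children) {nid} := by
    have : pvStep children leaves ({nid} : Finset String) = pvIter children leaves 1 {nid} := rfl
    rw [this]
    exact pv_iter_le_mono children leaves (by unfold pvN; omega) _
  exact h2 h1

lemma pv_rank_lt (roots : List String) (children : List (String × List String)) (leaves : List String)
    {nid c : String} (hpre : Pre_compute_leaf_sets roots children leaves)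
    (hn : nid ∈ pvReach roots children leaves) (hl : leaves.contains nid = false)
    (hc : c ∈ pvChildren children nid) :
    (pvIter children leaves (pvN roots children) {c}).card
      < (pvIter children leaves (pvN roots children) {nid}).card := by
  apply Finset.card_lt_card
  constructor
  · exact pv_iter_child_sub roots children leaves hl hc
  · intro hcon
    have h1 : nid ∈ pvIter children leaves (pvN roots children) {nid} :=
      pv_sub_iter children leaves _ _ (Finset.mem_singleton_self nid)
    have h2 : nid ∈ pvIter children leaves (pvN roots children) {c} := hcon h1
    have h3 : pvIter children leaves (pvN roots children) {c}
        ⊆ pvIter children leaves (pvN roots children) (pvSucc children leaves nid).toFinset := by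
      apply pv_iter_mono
      intro y hy
      rw [Finset.mem_singleton] at hy; subst hy
      have hl' : nid ∉ leaves := by simpa using hl
      exact List.mem_toFinset.mpr (by simp [pvSucc, hl', hc])
    exact hpre nid hn (h3 h2)

lemma pv_rank_le (roots : List String) (children : List (String × List String)) (leaves : List String) (x : String) :
    (pvIter children leaves (pvN roots children) {x}).card ≤ (pvW children).length + 1 := by
  calc (pvIter children leaves (pvN roots children) {x}).card
      ≤ ({x} ∪ (pvW children).toFinset).card := Finset.card_le_card (pv_iter_sub_union children leaves _ _)
    _ ≤ 1 + (pvW children).length := le_trans (Finset.card_union_le _ _) (Nat.add_le_add (by simp) (pvW children).toFinset_card_le)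
    _ ≤ _ := by omega
def pvFoldO (g : List String → String → Option (List String × Nat)) :
    List String → List String → Option (List String × Nat)
  | ord, [] => some (ord, 0)
  | ord, c :: cs =>
    match g ord c with
    | none => none
    | some (o, c1) =>
      match pvFoldO g o cs with
      | none => none
      | some (o2, c2) => some (o2, c1 + c2)

def pvVisit (children : List (String × List String)) (leaves : List String) :
    Nat → List String → String → Option (List String × Nat)
  | 0, _, _ => none
  | Nat.succ f, ord, nid =>
    if ord.contains nid then some (ord, 1)
    else if leaves.contains nid then some (ord ++ [nid], 1)
    else
      match pvFoldO (pvVisit children leaves f) ord (pvChildren children nid) with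
      | none => none
      | some (o, c) => some (o ++ [nid], c + 2)

lemma pv_foldO_isSome {cs : List String} {g : List String → String → Option (List String × Nat)}
    (h : ∀ o c, c ∈ cs → (g o c).isSome) (ord : List String) : (pvFoldO g ord cs).isSome := by
  induction cs generalizing ord with
  | nil => simp [pvFoldO]
  | cons c cs ih =>
    have h1 := h ord c List.mem_cons_self
    rcases Option.isSome_iff_exists.mp h1 with ⟨⟨o1, c1⟩, heq⟩
    have h2 := ih (fun o x hx => h o x (List.mem_cons_of_mem _ hx)) o1
    rcases Option.isSome_iff_exists.mp h2 with ⟨⟨o2, c2⟩, heq2⟩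
    simp [pvFoldO, heq, heq2]

lemma pv_visit_isSome (roots : List String) (children : List (String × List String)) (leaves : List String)
    (hpre : Pre_compute_leaf_sets roots children leaves) :
    ∀ (v : Nat) (nid : String), nid ∈ pvReach roots children leaves →
      (pvIter children leaves (pvN roots children) {nid}).card < v →
      ∀ ord, (pvVisit children leaves v ord nid).isSome := by
  intro v
  induction v with
  | zero => intro nid _ h; omega
  | succ v ih =>
    intro nid hn hrank ord
    rw [pvVisit]
    by_cases h1 : nid ∈ ord
    · simp [h1]
    · by_cases h2 : nid ∈ leaves
      · simp [h1, h2]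
      · have hl : leaves.contains nid = false := by simp [h2]
        have hfold : (pvFoldO (pvVisit children leaves v) ord (pvChildren children nid)).isSome := by
          apply pv_foldO_isSome
          intro o c hc
          apply ih c (pv_child_in_reach roots children leaves hn hl hc)
          have := pv_rank_lt roots children leaves hpre hn hl hc
          omega
        rcases Option.isSome_iff_exists.mp hfold with ⟨⟨o, cst⟩, heq⟩
        simp [h1, h2, heq]
lemma pv_visit_shape (roots : List String) (children : List (String × List String)) (leaves : List String)
    (hpre : Pre_compute_leaf_sets roots children leaves) (v : Nat) :
    (∀ ord nid o c, nid ∈ pvReach roots children leaves →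
      pvVisit children leaves v ord nid = some (o, c) →
      (ord <+: o) ∧ (ord.Nodup → o.Nodup) ∧ nid ∈ o ∧
        (∀ x ∈ o, x ∈ ord ∨ x ∈ pvIter children leaves (pvN roots children) {nid})) ∧
    (∀ ord cs o c, (∀ x ∈ cs, x ∈ pvReach roots children leaves) →
      pvFoldO (pvVisit children leaves v) ord cs = some (o, c) →
      (ord <+: o) ∧ (ord.Nodup → o.Nodup) ∧ (∀ x ∈ cs, x ∈ o) ∧
        (∀ x ∈ o, x ∈ ord ∨ ∃ y ∈ cs, x ∈ pvIter children leaves (pvN roots children) {y})) := by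
  induction v with
  | zero =>
    constructor
    · intro ord nid o c _ h
      simp [pvVisit] at h
    · intro ord cs o c _ h
      cases cs with
      | nil =>
        simp [pvFoldO] at h
        obtain ⟨rfl, rfl⟩ := h
        exact ⟨List.prefix_refl _, id, by simp, fun x hx => Or.inl hx⟩
      | cons c' cs' => simp [pvFoldO, pvVisit] at h
  | succ v ih =>
    obtain ⟨_, ihf⟩ := ih
    have hv : ∀ ord nid o c, nid ∈ pvReach roots children leaves →
        pvVisit children leaves (v + 1) ord nid = some (o, c) →
        (ord <+: o) ∧ (ord.Nodup → o.Nodup) ∧ nid ∈ o ∧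
          (∀ x ∈ o, x ∈ ord ∨ x ∈ pvIter children leaves (pvN roots children) {nid}) := by
      intro ord nid o c hn h
      rw [pvVisit] at h
      by_cases h1 : nid ∈ ord
      · simp [h1] at h
        obtain ⟨rfl, rfl⟩ := h
        exact ⟨List.prefix_refl _, id, h1, fun x hx => Or.inl hx⟩
      · by_cases h2 : nid ∈ leaves
        · simp [h1, h2] at h
          obtain ⟨rfl, rfl⟩ := h
          refine ⟨⟨[nid], rfl⟩, ?_, by simp, ?_⟩
          · intro hnd
            simp [List.nodup_append, hnd]
            exact fun a ha hc => h1 (hc ▸ ha)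
          · intro x hx
            rcases List.mem_append.mp hx with hx | hx
            · exact Or.inl hx
            · simp at hx
              subst hx
              exact Or.inr (pv_sub_iter children leaves _ _ (Finset.mem_singleton_self x))
        · have hl : leaves.contains nid = false := by simp [h2]
          rcases heq : pvFoldO (pvVisit children leaves v) ord (pvChildren children nid) with _ | ⟨o1, c1⟩
          · simp [h1, h2, heq] at h
          · simp [h1, h2, heq] at h
            obtain ⟨rfl, rfl⟩ := h
            have hreach : ∀ x ∈ pvChildren children nid, x ∈ pvReach roots children leaves :=
              fun x hx => pv_child_in_reach roots children leaves hn hl hx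
            obtain ⟨hpfx, hnd, _, hext⟩ := ihf ord (pvChildren children nid) o1 c1 hreach heq
            have hnid_not : nid ∉ o1 := by
              intro hc
              rcases hext nid hc with hx | ⟨y, hy, hiter⟩
              · exact h1 hx
              · apply hpre nid hn
                refine pv_iter_mono children leaves _ ?_ hiter
                intro z hz
                rw [Finset.mem_singleton] at hz; subst hz
                exact List.mem_toFinset.mpr (by simp [pvSucc, h2, hy])
            refine ⟨hpfx.trans ⟨[nid], rfl⟩, ?_, by simp, ?_⟩
            · intro hnd0
              simp [List.nodup_append, hnd hnd0]
              exact fun a ha hc => hnid_not (hc ▸ ha)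
            · intro x hx
              rcases List.mem_append.mp hx with hx | hx
              · rcases hext x hx with hx' | ⟨y, hy, hiter⟩
                · exact Or.inl hx'
                · exact Or.inr (pv_iter_child_sub roots children leaves hl hy hiter)
              · simp at hx; subst hx
                exact Or.inr (pv_sub_iter children leaves _ _ (Finset.mem_singleton_self x))
    refine ⟨hv, ?_⟩
    intro ord cs
    induction cs generalizing ord with
    | nil =>
      intro o c _ h
      simp [pvFoldO] at h
      obtain ⟨rfl, rfl⟩ := h
      exact ⟨List.prefix_refl _, id, by simp, fun x hx => Or.inl hx⟩
    | cons c' cs' ihl =>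
      intro o c hre h
      rcases heq : pvVisit children leaves (v + 1) ord c' with _ | ⟨o1, c1⟩ <;> rw [pvFoldO, heq] at h
      · exact absurd h (by simp)
      · dsimp only at h
        rcases heq2 : pvFoldO (pvVisit children leaves (v + 1)) o1 cs' with _ | ⟨o2, c2⟩ <;> rw [heq2] at h
        · exact absurd h (by simp)
        · simp at h
          obtain ⟨rfl, rfl⟩ := h
          obtain ⟨hpfx1, hnd1, hmem1, hext1⟩ := hv ord c' o1 c1 (hre c' List.mem_cons_self) heq
          obtain ⟨hpfx2, hnd2, hmem2, hext2⟩ :=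
            ihl o1 o2 c2 (fun x hx => hre x (List.mem_cons_of_mem _ hx)) heq2
          refine ⟨hpfx1.trans hpfx2, fun hnd => hnd2 (hnd1 hnd), ?_, ?_⟩
          · intro x hx
            rcases List.mem_cons.mp hx with rfl | hx
            · exact hpfx2.subset hmem1
            · exact hmem2 x hx
          · intro x hx
            rcases hext2 x hx with hx' | ⟨y, hy, hiter⟩
            · rcases hext1 x hx' with hx'' | hiter
              · exact Or.inl hx''
              · exact Or.inr ⟨c', List.mem_cons_self, hiter⟩
            · exact Or.inr ⟨y, List.mem_cons_of_mem _ hy, hiter⟩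
lemma pv_visit_cost (children : List (String × List String)) (leaves : List String) (v : Nat) :
    (∀ ord nid o c, pvVisit children leaves v ord nid = some (o, c) →
      c ≤ 2 * ((pvW children).length + 1) ^ v) ∧
    (∀ ord cs o c, pvFoldO (pvVisit children leaves v) ord cs = some (o, c) →
      c ≤ cs.length * (2 * ((pvW children).length + 1) ^ v)) := by
  induction v with
  | zero =>
    constructor
    · intro ord nid o c h; simp [pvVisit] at h
    · intro ord cs o c h
      cases cs with
      | nil => simp [pvFoldO] at h; omega
      | cons c' cs' => simp [pvFoldO, pvVisit] at h
  | succ v ih =>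
    obtain ⟨ihv, _⟩ := ih
    have hpow : 1 ≤ ((pvW children).length + 1) ^ v := Nat.one_le_pow _ _ (by omega)
    have hfold : ∀ ord cs o c, pvFoldO (pvVisit children leaves v) ord cs = some (o, c) →
        c ≤ cs.length * (2 * ((pvW children).length + 1) ^ v) := by
      intro ord cs
      induction cs generalizing ord with
      | nil => intro o c h; simp [pvFoldO] at h; omega
      | cons c' cs' ihl =>
        intro o c h
        rcases heq : pvVisit children leaves v ord c' with _ | ⟨o1, c1⟩ <;> rw [pvFoldO, heq] at h
        · exact absurd h (by simp)
        · dsimp only at h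
          rcases heq2 : pvFoldO (pvVisit children leaves v) o1 cs' with _ | ⟨o2, c2⟩ <;> rw [heq2] at h
          · exact absurd h (by simp)
          · simp at h
            obtain ⟨-, rfl⟩ := h
            have h1 := ihv ord c' o1 c1 heq
            have h2 := ihl o1 o2 c2 heq2
            simp only [List.length_cons]
            calc c1 + c2 ≤ 2 * ((pvW children).length + 1) ^ v
                  + cs'.length * (2 * ((pvW children).length + 1) ^ v) := Nat.add_le_add h1 h2
              _ = (cs'.length + 1) * (2 * ((pvW children).length + 1) ^ v) := by ring
    have hv : ∀ ord nid o c, pvVisit children leaves (v + 1) ord nid = some (o, c) →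
        c ≤ 2 * ((pvW children).length + 1) ^ (v + 1) := by
      intro ord nid o c h
      rw [pvVisit] at h
      by_cases h1 : nid ∈ ord
      · simp [h1] at h
        obtain ⟨-, rfl⟩ := h
        calc (1:Nat) ≤ 2 * 1 := by omega
          _ ≤ 2 * ((pvW children).length + 1) ^ (v + 1) := Nat.mul_le_mul_left _ (Nat.one_le_pow _ _ (by omega))
      · by_cases h2 : nid ∈ leaves
        · simp [h1, h2] at h
          obtain ⟨-, rfl⟩ := h
          calc (1:Nat) ≤ 2 * 1 := by omega
            _ ≤ 2 * ((pvW children).length + 1) ^ (v + 1) := Nat.mul_le_mul_left _ (Nat.one_le_pow _ _ (by omega))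
        · rcases heq : pvFoldO (pvVisit children leaves v) ord (pvChildren children nid) with _ | ⟨o1, c1⟩
          · simp [h1, h2, heq] at h
          · simp [h1, h2, heq] at h
            obtain ⟨-, rfl⟩ := h
            have hc1 := hfold ord (pvChildren children nid) o1 c1 heq
            have hlen := pv_children_len children nid
            have hK : c1 ≤ (pvW children).length * (2 * ((pvW children).length + 1) ^ v) :=
              le_trans hc1 (Nat.mul_le_mul_right _ hlen)
            calc c1 + 2
                ≤ (pvW children).length * (2 * ((pvW children).length + 1) ^ v)
                  + 2 * ((pvW children).length + 1) ^ v := by omega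
              _ = 2 * ((pvW children).length + 1) ^ (v + 1) := by ring
    refine ⟨hv, ?_⟩
    intro ord cs
    induction cs generalizing ord with
    | nil => intro o c h; simp [pvFoldO] at h; omega
    | cons c' cs' ihl =>
      intro o c h
      rcases heq : pvVisit children leaves (v + 1) ord c' with _ | ⟨o1, c1⟩ <;> rw [pvFoldO, heq] at h
      · exact absurd h (by simp)
      · dsimp only at h
        rcases heq2 : pvFoldO (pvVisit children leaves (v + 1)) o1 cs' with _ | ⟨o2, c2⟩ <;> rw [heq2] at h
        · exact absurd h (by simp)
        · simp at h
          obtain ⟨-, rfl⟩ := h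
          have h1 := hv ord c' o1 c1 heq
          have h2 := ihl o1 o2 c2 heq2
          simp only [List.length_cons]
          calc c1 + c2 ≤ 2 * ((pvW children).length + 1) ^ (v + 1)
                + cs'.length * (2 * ((pvW children).length + 1) ^ (v + 1)) := Nat.add_le_add h1 h2
            _ = (cs'.length + 1) * (2 * ((pvW children).length + 1) ^ (v + 1)) := by ring
lemma pv_build_append (children : List (String × List String)) (leaves : List String) (ord : List String) (x : String) :
    pvBuild children leaves (ord ++ [x])
      = (pvBuild children leaves ord).insert x (pvVal children leaves (pvBuild children leaves ord) x) := by
  simp [pvBuild, List.foldl_append]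

lemma pv_build_keys (children : List (String × List String)) (leaves : List String) {ord : List String}
    (h : ord.Nodup) : (pvBuild children leaves ord).keys = ord := by
  rw [pvBuild, PySem.Dict.keys_foldl_insert, PySem.Dict.keys_empty, PySem.Set.update_nil_left]
  exact PySem.Set.ofList_eq_self_of_nodup _ h

lemma pv_build_getD_prefix (children : List (String × List String)) (leaves : List String) :
    ∀ (ext ord : List String) (y : String), y ∈ ord → (ord ++ ext).Nodup →
      (pvBuild children leaves (ord ++ ext)).getD y PySem.Set.empty
        = (pvBuild children leaves ord).getD y PySem.Set.empty := by
  intro ext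
  induction ext with
  | nil => intro ord y _ _; simp
  | cons e ext ih =>
    intro ord y hy hnd
    have h1 : ord ++ e :: ext = (ord ++ [e]) ++ ext := by simp
    have hne : y ≠ e := (List.nodup_append.mp hnd).2.2 y hy e List.mem_cons_self
    rw [h1, ih (ord ++ [e]) y (List.mem_append.mpr (Or.inl hy)) (by rw [← h1]; exact hnd),
      pv_build_append, PySem.Dict.getD_insert_of_ne _ _ _ hne]
lemma pv_achar (roots : List String) (children : List (String × List String)) (leaves : List String)
    (hpre : Pre_compute_leaf_sets roots children leaves) (v : Nat) :
    (∀ ord nid, nid ∈ pvReach roots children leaves → ord.Nodup →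
      pvLeafSetA children leaves v (pvBuild children leaves ord) nid
        = (pvVisit children leaves v ord nid).map
            (fun oc => (pvBuild children leaves oc.1,
                        (pvBuild children leaves oc.1).getD nid PySem.Set.empty))) ∧
    (∀ ord cs acc, (∀ x ∈ cs, x ∈ pvReach roots children leaves) → ord.Nodup →
      pvFoldA (pvLeafSetA children leaves v) (pvBuild children leaves ord) cs acc
        = (pvFoldO (pvVisit children leaves v) ord cs).map
            (fun oc => (pvBuild children leaves oc.1,
                        cs.foldl (fun a c => PySem.Set.union a
                          ((pvBuild children leaves oc.1).getD c PySem.Set.empty)) acc))) := by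
  induction v with
  | zero =>
    constructor
    · intro ord nid _ _
      simp [pvLeafSetA, pvVisit]
    · intro ord cs acc _ _
      cases cs with
      | nil => simp [pvFoldA, pvFoldO]
      | cons c' cs' => simp [pvFoldA, pvFoldO, pvLeafSetA, pvVisit]
  | succ v ih =>
    obtain ⟨_, ihf⟩ := ih
    have hv : ∀ ord nid, nid ∈ pvReach roots children leaves → ord.Nodup →
        pvLeafSetA children leaves (v + 1) (pvBuild children leaves ord) nid
          = (pvVisit children leaves (v + 1) ord nid).map
              (fun oc => (pvBuild children leaves oc.1,
                          (pvBuild children leaves oc.1).getD nid PySem.Set.empty)) := by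
      intro ord nid hn hnd
      have hkeys : (pvBuild children leaves ord).keys = ord := pv_build_keys children leaves hnd
      rw [pvLeafSetA, pvVisit]
      by_cases h1 : nid ∈ ord
      · have hb1 : ord.contains nid = true := by simpa using h1
        rcases hget : (pvBuild children leaves ord).get? nid with _ | val
        · exfalso
          rw [PySem.Dict.get?_eq_none_iff_not_mem_keys, hkeys] at hget
          exact hget h1
        · rw [hb1]
          simp [PySem.Dict.getD_of_get?_eq_some _ _ hget]
      · have hb1 : ord.contains nid = false := by simpa using h1
        have hget : (pvBuild children leaves ord).get? nid = none := by
          rw [PySem.Dict.get?_eq_none_iff_not_mem_keys, hkeys]; exact h1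
        rw [hget, hb1]
        by_cases h2 : nid ∈ leaves
        · have hb2 : leaves.contains nid = true := by simpa using h2
          rw [hb2]
          have hval : pvVal children leaves (pvBuild children leaves ord) nid = PySem.Set.ofList [nid] := by
            simp [pvVal, h2]
          simp [pv_build_append, hval, PySem.Dict.getD_insert_self]
        · have hb2 : leaves.contains nid = false := by simpa using h2
          rw [hb2]
          have hreach : ∀ x ∈ pvChildren children nid, x ∈ pvReach roots children leaves :=
            fun x hx => pv_child_in_reach roots children leaves hn hb2 hx
          rw [ihf ord (pvChildren children nid) PySem.Set.empty hreach hnd]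
          rcases heq : pvFoldO (pvVisit children leaves v) ord (pvChildren children nid) with _ | ⟨o1, c1⟩
          · simp
          · have hval : pvVal children leaves (pvBuild children leaves o1) nid
                = (pvChildren children nid).foldl (fun a c => PySem.Set.union a
                    ((pvBuild children leaves o1).getD c PySem.Set.empty)) PySem.Set.empty := by
              simp [pvVal, h2]
            simp only [Option.map_some, Bool.false_eq_true, if_false]
            rw [pv_build_append, hval, PySem.Dict.getD_insert_self]
    refine ⟨hv, ?_⟩
    intro ord cs
    induction cs generalizing ord with
    | nil =>
      intro acc _ _
      simp [pvFoldA, pvFoldO]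
    | cons c' cs' ihl =>
      intro acc hre hnd
      rw [pvFoldA, pvFoldO, hv ord c' (hre c' List.mem_cons_self) hnd]
      rcases heq : pvVisit children leaves (v + 1) ord c' with _ | ⟨o1, c1⟩
      · simp
      · simp only [Option.map_some]
        obtain ⟨hpfx1, hnd1, hmem1, _⟩ :=
          (pv_visit_shape roots children leaves hpre (v + 1)).1 ord c' o1 c1 (hre c' List.mem_cons_self) heq
        have hnd1' : o1.Nodup := hnd1 hnd
        rw [ihl o1 (PySem.Set.union acc ((pvBuild children leaves o1).getD c' PySem.Set.empty))
          (fun x hx => hre x (List.mem_cons_of_mem _ hx)) hnd1']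
        rcases heq2 : pvFoldO (pvVisit children leaves (v + 1)) o1 cs' with _ | ⟨o2, c2⟩
        · simp
        · dsimp only [Option.map_some, List.foldl_cons]
          obtain ⟨hpfx2, hnd2, _, _⟩ :=
            (pv_visit_shape roots children leaves hpre (v + 1)).2 o1 cs' o2 c2
              (fun x hx => hre x (List.mem_cons_of_mem _ hx)) heq2
          obtain ⟨ext, rfl⟩ := hpfx2
          rw [pv_build_getD_prefix children leaves ext o1 c' hmem1 (hnd2 hnd1')]
lemma pvPostLoop_nil (children : List (String × List String)) (leaves : List String) (f : Nat)
    (seen : PySem.Set String) (ord : List String) :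
    pvPostLoop children leaves f seen ord [] = some ord := by
  cases f <;> rfl

lemma pvPostLoop_true (children : List (String × List String)) (leaves : List String) (f : Nat)
    {ord : List String} {nid : String} (st : List (String × Bool)) (h : nid ∉ ord) :
    pvPostLoop children leaves (f + 1) ord ord ((nid, true) :: st)
      = pvPostLoop children leaves f (ord ++ [nid]) (ord ++ [nid]) st := by
  simp [pvPostLoop, PySem.Set.add_of_not_mem h]

lemma pvPostLoop_false_mem (children : List (String × List String)) (leaves : List String) (f : Nat)
    {ord : List String} {nid : String} (st : List (String × Bool)) (h : nid ∈ ord) :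
    pvPostLoop children leaves (f + 1) ord ord ((nid, false) :: st) = pvPostLoop children leaves f ord ord st := by
  simp [pvPostLoop, h]

lemma pvPostLoop_false_leaf (children : List (String × List String)) (leaves : List String) (f : Nat)
    {ord : List String} {nid : String} (st : List (String × Bool)) (h1 : nid ∉ ord) (h2 : nid ∈ leaves) :
    pvPostLoop children leaves (f + 1) ord ord ((nid, false) :: st)
      = pvPostLoop children leaves f (ord ++ [nid]) (ord ++ [nid]) st := by
  simp [pvPostLoop, h1, h2, PySem.Set.add_of_not_mem h1]

lemma pvPostLoop_false_expand (children : List (String × List String)) (leaves : List String) (f : Nat)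
    {ord : List String} {nid : String} (st : List (String × Bool)) (h1 : nid ∉ ord) (h2 : nid ∉ leaves) :
    pvPostLoop children leaves (f + 1) ord ord ((nid, false) :: st)
      = pvPostLoop children leaves f ord ord
          ((pvChildren children nid).map (fun c => (c, false)) ++ (nid, true) :: st) := by
  simp [pvPostLoop, h1, h2]

lemma pv_sim (roots : List String) (children : List (String × List String)) (leaves : List String)
    (hpre : Pre_compute_leaf_sets roots children leaves) (v : Nat) :
    (∀ ord nid o c, nid ∈ pvReach roots children leaves →
      pvVisit children leaves v ord nid = some (o, c) →
      ∀ f st, pvPostLoop children leaves (c + f) ord ord ((nid, false) :: st)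
        = pvPostLoop children leaves f o o st) ∧
    (∀ ord cs o c, (∀ x ∈ cs, x ∈ pvReach roots children leaves) →
      pvFoldO (pvVisit children leaves v) ord cs = some (o, c) →
      ∀ f st, pvPostLoop children leaves (c + f) ord ord (cs.map (fun x => (x, false)) ++ st)
        = pvPostLoop children leaves f o o st) := by
  induction v with
  | zero =>
    constructor
    · intro ord nid o c _ h; simp [pvVisit] at h
    · intro ord cs o c _ h
      cases cs with
      | nil =>
        simp [pvFoldO] at h
        obtain ⟨rfl, rfl⟩ := h
        intro f st; simp
      | cons c' cs' => simp [pvFoldO, pvVisit] at h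
  | succ v ih =>
    obtain ⟨_, ihf⟩ := ih
    have hv : ∀ ord nid o c, nid ∈ pvReach roots children leaves →
        pvVisit children leaves (v + 1) ord nid = some (o, c) →
        ∀ f st, pvPostLoop children leaves (c + f) ord ord ((nid, false) :: st)
          = pvPostLoop children leaves f o o st := by
      intro ord nid o c hn h
      rw [pvVisit] at h
      by_cases h1 : nid ∈ ord
      · simp [h1] at h
        obtain ⟨rfl, rfl⟩ := h
        intro f st
        rw [Nat.add_comm 1 f, pvPostLoop_false_mem children leaves f st h1]
      · by_cases h2 : nid ∈ leaves
        · simp [h1, h2] at h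
          obtain ⟨rfl, rfl⟩ := h
          intro f st
          rw [Nat.add_comm 1 f, pvPostLoop_false_leaf children leaves f st h1 h2]
        · rcases heq : pvFoldO (pvVisit children leaves v) ord (pvChildren children nid) with _ | ⟨o1, c1⟩
          · simp [h1, h2, heq] at h
          · simp [h1, h2, heq] at h
            obtain ⟨rfl, rfl⟩ := h
            have hb2 : leaves.contains nid = false := by simp [h2]
            have hreach : ∀ x ∈ pvChildren children nid, x ∈ pvReach roots children leaves :=
              fun x hx => pv_child_in_reach roots children leaves hn hb2 hx
            obtain ⟨_, _, _, hext⟩ :=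
              (pv_visit_shape roots children leaves hpre v).2 ord (pvChildren children nid) o1 c1 hreach heq
            have hnid_not : nid ∉ o1 := by
              intro hc
              rcases hext nid hc with hx | ⟨y, hy, hiter⟩
              · exact h1 hx
              · apply hpre nid hn
                refine pv_iter_mono children leaves _ ?_ hiter
                intro z hz
                rw [Finset.mem_singleton] at hz; subst hz
                exact List.mem_toFinset.mpr (by simp [pvSucc, h2, hy])
            intro f st
            have e : c1 + 2 + f = (c1 + (1 + f)) + 1 := by omega
            rw [e, pvPostLoop_false_expand children leaves _ st h1 h2,
              ihf ord _ o1 c1 hreach heq (1 + f) ((nid, true) :: st), Nat.add_comm 1 f,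
              pvPostLoop_true children leaves f st hnid_not]
    refine ⟨hv, ?_⟩
    intro ord cs
    induction cs generalizing ord with
    | nil =>
      intro o c _ h
      simp [pvFoldO] at h
      obtain ⟨rfl, rfl⟩ := h
      intro f st; simp
    | cons c' cs' ihl =>
      intro o c hre h
      rcases heq : pvVisit children leaves (v + 1) ord c' with _ | ⟨o1, c1⟩ <;> rw [pvFoldO, heq] at h
      · exact absurd h (by simp)
      · dsimp only at h
        rcases heq2 : pvFoldO (pvVisit children leaves (v + 1)) o1 cs' with _ | ⟨o2, c2⟩ <;> rw [heq2] at h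
        · exact absurd h (by simp)
        · simp at h
          obtain ⟨rfl, rfl⟩ := h
          intro f st
          have e : c1 + c2 + f = c1 + (c2 + f) := by omega
          rw [List.map_cons, List.cons_append, e,
            hv ord c' o1 c1 (hre c' List.mem_cons_self) heq (c2 + f) (cs'.map (fun x => (x, false)) ++ st),
            ihl o1 o2 c2 (fun x hx => hre x (List.mem_cons_of_mem _ hx)) heq2 f st]

lemma pv_topA (roots : List String) (children : List (String × List String)) (leaves : List String)
    (hpre : Pre_compute_leaf_sets roots children leaves) :
    ∀ (rs : List String) (ord : List String), (∀ r ∈ rs, r ∈ pvReach roots children leaves) → ord.Nodup →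
      pvRootsA children leaves (pvFuelA roots children) (pvBuild children leaves ord) rs
        = (pvFoldO (pvVisit children leaves (pvFuelA roots children)) ord rs).map
            (fun oc => pvBuild children leaves oc.1) := by
  intro rs
  induction rs with
  | nil => intro ord _ _; simp [pvRootsA, pvFoldO]
  | cons r rs ih =>
    intro ord hre hnd
    rw [pvRootsA, pvFoldO,
      (pv_achar roots children leaves hpre (pvFuelA roots children)).1 ord r (hre r List.mem_cons_self) hnd]
    rcases heq : pvVisit children leaves (pvFuelA roots children) ord r with _ | ⟨o1, c1⟩
    · simp
    · simp only [Option.map_some]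
      obtain ⟨_, hnd1, _, _⟩ :=
        (pv_visit_shape roots children leaves hpre (pvFuelA roots children)).1 ord r o1 c1
          (hre r List.mem_cons_self) heq
      rw [ih o1 (fun x hx => hre x (List.mem_cons_of_mem _ hx)) (hnd1 hnd)]
      rcases heq2 : pvFoldO (pvVisit children leaves (pvFuelA roots children)) o1 rs with _ | ⟨o2, c2⟩
      · simp
      · simp

-- ===== VERDICT (by name: the statement is the Claim_ definition above) =====
theorem compute_leaf_sets_spec : Claim_equal_compute_leaf_sets := by
  intro roots children leaves _ hpre
  unfold Spec_compute_leaf_sets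
  have hroots : ∀ r ∈ roots, r ∈ pvReach roots children leaves :=
    fun r hr => pv_sub_iter children leaves _ _ (List.mem_toFinset.mpr hr)
  have hS : ∀ (o : List String) (r : String), r ∈ roots →
      (pvVisit children leaves (pvFuelA roots children) o r).isSome := by
    intro o r hr
    apply pv_visit_isSome roots children leaves hpre _ r (hroots r hr) ?_ o
    have := pv_rank_le roots children leaves r
    unfold pvFuelA pvN
    unfold pvN at this
    omega
  have hfold := pv_foldO_isSome (cs := roots) (fun o c hc => hS o c hc) []
  rcases Option.isSome_iff_exists.mp hfold with ⟨⟨ordF, ct⟩, heq⟩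
  have hA : pvRootsA children leaves (pvFuelA roots children) PySem.Dict.empty roots
      = some (pvBuild children leaves ordF) := by
    have h0 : (PySem.Dict.empty : pvMemo) = pvBuild children leaves ([] : List String) := rfl
    rw [h0, pv_topA roots children leaves hpre roots [] hroots List.nodup_nil, heq]
    rfl
  have hct : ct ≤ pvFuelB roots children := by
    have h := (pv_visit_cost children leaves (pvFuelA roots children)).2 [] roots ordF ct heq
    simpa [pvFuelB] using h
  have hB : pvPostLoop children leaves (pvFuelB roots children) PySem.Set.empty [] (roots.map (fun r => (r, false)))
      = some ordF := by
    have e : pvFuelB roots children = ct + (pvFuelB roots children - ct) := by omega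
    have hsim := (pv_sim roots children leaves hpre (pvFuelA roots children)).2 [] roots ordF ct hroots heq
      (pvFuelB roots children - ct) []
    rw [List.append_nil] at hsim
    show pvPostLoop children leaves (pvFuelB roots children) [] [] (roots.map (fun r => (r, false))) = some ordF
    rw [e, hsim, pvPostLoop_nil]
  rw [compute_leaf_sets, compute_leaf_sets_alt, hA, hB]
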